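-- pv_equiv track=rewrite | github.com/williamfhe/advent-of-code-2023 | Day_11/part_2.py | get_galaxies_positions
-- ===== SOURCE A (Python) =====
-- def get_galaxies_positions(space_map: list[str]) -> list[tuple[int, int]]:
--     w = len(space_map[0])
--     h = len(space_map)
--     empty_rows = set(range(h))
--     empty_columns = set(range(w))
--
--     for r in range(h):
--         for c in range(w):
--             if space_map[r][c] == "#":
--                 empty_rows.discard(r)
--                 empty_columns.discard(c)
--
--     offset_size = 1000000 - 1
--     galaxies = []
--     offset_row = 0
--     for r in range(h):
--         if r in empty_rows:
--             offset_row += offset_size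
--             continue
--         offset_columns = 0
--         for c in range(w):
--             if c in empty_columns:
--                 offset_columns += offset_size
--                 continue
--
--             if space_map[r][c] == "#":
--                 galaxies.append((r + offset_row, c + offset_columns))
--
--     return galaxies
-- ===== SOURCE B (Python) =====
-- def get_galaxies_positions(space_map: list[str]) -> list[tuple[int, int]]:
--     w = len(space_map[0])
--     h = len(space_map)
--     row_has = [any(ch == "#" for ch in row[:w]) for row in space_map]
--     col_has = [any(row[c] == "#" for row in space_map) for c in range(w)]
--     offset_size = 1000000 - 1
--     rows_before, acc = [], 0
--     for has in row_has:
--         rows_before.append(acc)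
--         if not has:
--             acc += 1
--     cols_before, acc = [], 0
--     for has in col_has:
--         cols_before.append(acc)
--         if not has:
--             acc += 1
--     return [
--         (r + offset_size * rows_before[r], c + offset_size * cols_before[c])
--         for r in range(h)
--         for c in range(w)
--         if space_map[r][c] == "#"
--     ]
-- ===== Notes on version B (the rewrite author's own statement) =====
-- stated objective: simpler
-- what changed: B replaces A's set-of-indices discarding and the offset accumulators threaded through the nested loops by per-row/per-column boolean flags, two prefix-count tables, and a single comprehension that computes each galaxy's expanded coordinates by direct table lookup.
-- outside the precondition, e.g. on get_galaxies_positions([]): A raises IndexError, B raises IndexError; on get_galaxies_positions(['..#', '#']): A raises IndexError, B raises IndexError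
import Mathlib
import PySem

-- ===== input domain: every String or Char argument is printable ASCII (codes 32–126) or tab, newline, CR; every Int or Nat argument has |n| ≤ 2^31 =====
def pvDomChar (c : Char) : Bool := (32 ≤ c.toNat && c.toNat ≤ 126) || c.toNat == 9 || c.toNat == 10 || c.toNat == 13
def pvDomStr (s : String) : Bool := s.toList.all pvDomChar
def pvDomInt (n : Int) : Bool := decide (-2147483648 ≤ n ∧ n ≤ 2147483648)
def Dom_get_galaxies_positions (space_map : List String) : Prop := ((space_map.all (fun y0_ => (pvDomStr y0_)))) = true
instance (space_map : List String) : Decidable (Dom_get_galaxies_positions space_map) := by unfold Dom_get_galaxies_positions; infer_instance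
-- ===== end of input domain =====

-- B replaces A's threaded offset accumulators and set-discard passes by boolean row/column
-- flags, prefix-count tables and a single direct-lookup comprehension (objective: simpler).

-- ===== PORT A =====
-- space_map[r][c]; the default ' ' is only read out of range, which Pre_ excludes
def pvCell (rows : List (List Char)) (r c : Nat) : Char := (rows.getD r []).getD c ' ' 
-- first pass: discard non-empty row/column indices from the two sets
def aPassInner (rows : List (List Char)) (r : Nat) (cs : List Nat)
    (st : PySem.Set Nat × PySem.Set Nat) : PySem.Set Nat × PySem.Set Nat :=
  cs.foldl (fun st c =>
    if pvCell rows r c = '#' then (PySem.Set.discard st.1 r, PySem.Set.discard st.2 c) else st) st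

def aPass (rows : List (List Char)) (w : Nat) (rs : List Nat)
    (st : PySem.Set Nat × PySem.Set Nat) : PySem.Set Nat × PySem.Set Nat :=
  rs.foldl (fun st r => aPassInner rows r (List.range w) st) st

-- inner loop of the second pass: offset_columns accumulator in .2, galaxies in .1
def aMainInner (rows : List (List Char)) (r : Nat) (emptyCols : PySem.Set Nat)
    (off offRow : Int) (cs : List Nat) (st : List (Int × Int) × Int) : List (Int × Int) × Int :=
  cs.foldl (fun st c =>
    if PySem.Set.contains emptyCols c then (st.1, st.2 + off)
    else if pvCell rows r c = '#' then (st.1 ++ [((r : Int) + offRow, (c : Int) + st.2)], st.2)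
    else st) st

-- outer loop of the second pass: offset_row accumulator in .2
def aMain (rows : List (List Char)) (w : Nat) (emptyRows emptyCols : PySem.Set Nat)
    (off : Int) (rs : List Nat) (st : List (Int × Int) × Int) : List (Int × Int) × Int :=
  rs.foldl (fun st r =>
    if PySem.Set.contains emptyRows r then (st.1, st.2 + off)
    else ((aMainInner rows r emptyCols off st.2 (List.range w) (st.1, 0)).1, st.2)) st

def get_galaxies_positions (space_map : List String) : List (Int × Int) :=
  let rows := space_map.map String.toList
  let w := (rows.headD []).length        -- len(space_map[0]); Pre_ excludes the empty list
  let h := rows.length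
  let pass := aPass rows w (List.range h)
      (PySem.Set.ofList (List.range h), PySem.Set.ofList (List.range w))
  let offset_size : Int := 1000000 - 1
  (aMain rows w pass.1 pass.2 offset_size (List.range h) ([], 0)).1

-- ===== PORT B =====
-- prefix-count table: value before each position, counting the False entries
def bPrefix (bs : List Bool) (st : List Int × Int) : List Int × Int :=
  bs.foldl (fun p has => (p.1 ++ [p.2], if has then p.2 else p.2 + 1)) st

def get_galaxies_positions_alt (space_map : List String) : List (Int × Int) :=
  let rows := space_map.map String.toList
  let w := (rows.headD []).length        -- len(space_map[0]); Pre_ excludes the empty list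
  let h := rows.length
  let rowHas := rows.map (fun row => (row.take w).any (fun ch => ch == '#'))
  let colHas := (List.range w).map (fun c => rows.any (fun row => row.getD c ' ' == '#'))
  let offset_size : Int := 1000000 - 1
  let rowsBefore := (bPrefix rowHas ([], 0)).1
  let colsBefore := (bPrefix colHas ([], 0)).1
  (List.range h).flatMap (fun r =>
    (List.range w).filterMap (fun c =>
      if (rows.getD r []).getD c ' ' = '#'
      then some ((r : Int) + offset_size * rowsBefore.getD r 0,
                 (c : Int) + offset_size * colsBefore.getD c 0)
      else none))

-- ===== PRECONDITION & SPEC =====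
-- Pre_ excludes exactly the inputs where the Python A raises IndexError:
-- the empty list (len(space_map[0])) and maps with a row shorter than the first row.
def Pre_get_galaxies_positions (space_map : List String) : Prop :=
  space_map ≠ [] ∧ ∀ s ∈ space_map, (space_map.headD "").toList.length ≤ s.toList.length
instance (space_map : List String) : Decidable (Pre_get_galaxies_positions space_map) := by
  unfold Pre_get_galaxies_positions; infer_instance

def pvWitness_get_galaxies_positions : List String := ["#..", ".#.", "..."]

def Spec_get_galaxies_positions (space_map : List String) (out : List (Int × Int)) : Prop := out = get_galaxies_positions_alt space_map
instance (space_map : List String) (out : List (Int × Int)) : Decidable (Spec_get_galaxies_positions space_map out) := by unfold Spec_get_galaxies_positions; infer_instance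

-- ===== CLAIM (what is proved, stated in full; the proofs are below) =====
def Claim_equal_get_galaxies_positions : Prop := ∀ (space_map : List String), Dom_get_galaxies_positions space_map → Pre_get_galaxies_positions space_map → Spec_get_galaxies_positions space_map (get_galaxies_positions space_map)

-- ===== LEMMAS AND PROOFS =====

-- proof-side vocabulary: row r (resp. column c) contains a galaxy
def rHasB (rows : List (List Char)) (w r : Nat) : Bool := (List.range w).any (fun c => pvCell rows r c == '#')
def cHasB (rows : List (List Char)) (c : Nat) : Bool := (List.range rows.length).any (fun r => pvCell rows r c == '#')

-- number of empty rows (resp. columns) with index < i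
def cntR (rows : List (List Char)) (w i : Nat) : Nat :=
  (List.range i).countP (fun r => !rHasB rows w r)
def cntC (rows : List (List Char)) (j : Nat) : Nat :=
  (List.range j).countP (fun c => !cHasB rows c)


-- cons-step unfoldings of the four loops (definitional)
lemma aPassInner_cons (rows : List (List Char)) (r c : Nat) (cs : List Nat)
    (st : PySem.Set Nat × PySem.Set Nat) :
    aPassInner rows r (c :: cs) st
      = aPassInner rows r cs
          (if pvCell rows r c = '#'
           then (PySem.Set.discard st.1 r, PySem.Set.discard st.2 c) else st) := rfl

lemma aPass_cons (rows : List (List Char)) (w r : Nat) (rs : List Nat)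
    (st : PySem.Set Nat × PySem.Set Nat) :
    aPass rows w (r :: rs) st = aPass rows w rs (aPassInner rows r (List.range w) st) := rfl

lemma aMainInner_cons (rows : List (List Char)) (r : Nat) (EC : PySem.Set Nat)
    (off offRow : Int) (c : Nat) (cs : List Nat) (st : List (Int × Int) × Int) :
    aMainInner rows r EC off offRow (c :: cs) st
      = aMainInner rows r EC off offRow cs
          (if PySem.Set.contains EC c then (st.1, st.2 + off)
           else if pvCell rows r c = '#'
           then (st.1 ++ [((r : Int) + offRow, (c : Int) + st.2)], st.2)
           else st) := rfl

lemma aMain_cons (rows : List (List Char)) (w : Nat) (ER EC : PySem.Set Nat)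
    (off : Int) (r : Nat) (rs : List Nat) (st : List (Int × Int) × Int) :
    aMain rows w ER EC off (r :: rs) st
      = aMain rows w ER EC off rs
          (if PySem.Set.contains ER r then (st.1, st.2 + off)
           else ((aMainInner rows r EC off st.2 (List.range w) (st.1, 0)).1, st.2)) := rfl

-- membership in the first component of the first-pass inner fold
lemma passInner_mem_fst (rows : List (List Char)) (r : Nat) :
    ∀ (cs : List Nat) (st : PySem.Set Nat × PySem.Set Nat) (y : Nat),
      y ∈ (aPassInner rows r cs st).1 ↔
        y ∈ st.1 ∧ ¬(y = r ∧ ∃ c ∈ cs, pvCell rows r c = '#') := by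
  intro cs
  induction cs with
  | nil => intro st y; simp [aPassInner]
  | cons c cs ih =>
    intro st y
    rw [aPassInner_cons]
    by_cases hc : pvCell rows r c = '#'
    · rw [if_pos hc, ih]
      simp only [PySem.Set.mem_discard]
      constructor
      · rintro ⟨⟨hy, hyr⟩, -⟩
        exact ⟨hy, fun h => hyr h.1⟩
      · rintro ⟨hy, h3⟩
        refine ⟨⟨hy, fun he => h3 ⟨he, c, by simp, hc⟩⟩, ?_⟩
        rintro ⟨he, c', hc', hcell⟩
        exact h3 ⟨he, c', by simp [hc'], hcell⟩
    · rw [if_neg hc, ih]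
      constructor
      · rintro ⟨hy, h3⟩
        refine ⟨hy, ?_⟩
        rintro ⟨he, c', hc', hcell⟩
        rcases List.mem_cons.mp hc' with rfl | hmem
        · exact hc hcell
        · exact h3 ⟨he, c', hmem, hcell⟩
      · rintro ⟨hy, h3⟩
        refine ⟨hy, ?_⟩
        rintro ⟨he, c', hc', hcell⟩
        exact h3 ⟨he, c', List.mem_cons_of_mem _ hc', hcell⟩

-- membership in the second component of the first-pass inner fold
lemma passInner_mem_snd (rows : List (List Char)) (r : Nat) :
    ∀ (cs : List Nat) (st : PySem.Set Nat × PySem.Set Nat) (y : Nat),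
      y ∈ (aPassInner rows r cs st).2 ↔
        y ∈ st.2 ∧ ¬(∃ c ∈ cs, c = y ∧ pvCell rows r c = '#') := by
  intro cs
  induction cs with
  | nil => intro st y; simp [aPassInner]
  | cons c cs ih =>
    intro st y
    rw [aPassInner_cons]
    by_cases hc : pvCell rows r c = '#'
    · rw [if_pos hc, ih]
      simp only [PySem.Set.mem_discard]
      constructor
      · rintro ⟨⟨hy, hyc⟩, h3⟩
        refine ⟨hy, ?_⟩
        rintro ⟨c', hc', he, hcell⟩
        rcases List.mem_cons.mp hc' with rfl | hmem
        · exact hyc he.symm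
        · exact h3 ⟨c', hmem, he, hcell⟩
      · rintro ⟨hy, h3⟩
        refine ⟨⟨hy, fun he => h3 ⟨c, by simp, he.symm, hc⟩⟩, ?_⟩
        rintro ⟨c', hmem, he, hcell⟩
        exact h3 ⟨c', List.mem_cons_of_mem _ hmem, he, hcell⟩
    · rw [if_neg hc, ih]
      constructor
      · rintro ⟨hy, h3⟩
        refine ⟨hy, ?_⟩
        rintro ⟨c', hc', he, hcell⟩
        rcases List.mem_cons.mp hc' with rfl | hmem
        · exact hc hcell
        · exact h3 ⟨c', hmem, he, hcell⟩
      · rintro ⟨hy, h3⟩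
        refine ⟨hy, ?_⟩
        rintro ⟨c', hmem, he, hcell⟩
        exact h3 ⟨c', List.mem_cons_of_mem _ hmem, he, hcell⟩

-- membership after the whole first pass, row component
lemma aPass_mem_fst (rows : List (List Char)) (w : Nat) :
    ∀ (rs : List Nat) (st : PySem.Set Nat × PySem.Set Nat) (y : Nat),
      y ∈ (aPass rows w rs st).1 ↔
        y ∈ st.1 ∧ ¬(∃ r ∈ rs, r = y ∧ ∃ c ∈ List.range w, pvCell rows r c = '#') := by
  intro rs
  induction rs with
  | nil => intro st y; simp [aPass]
  | cons r rs ih =>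
    intro st y
    rw [aPass_cons, ih, passInner_mem_fst]
    constructor
    · rintro ⟨⟨h2, h3⟩, h4⟩
      refine ⟨h2, ?_⟩
      rintro ⟨r', hr', rfl, hc⟩
      rcases List.mem_cons.mp hr' with rfl | hr'
      · exact h3 ⟨rfl, hc⟩
      · exact h4 ⟨r', hr', rfl, hc⟩
    · rintro ⟨h2, h3⟩
      refine ⟨⟨h2, ?_⟩, ?_⟩
      · rintro ⟨rfl, hc⟩; exact h3 ⟨y, by simp, rfl, hc⟩
      · rintro ⟨r', hr', rfl, hc⟩; exact h3 ⟨r', List.mem_cons_of_mem _ hr', rfl, hc⟩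

-- membership after the whole first pass, column component
lemma aPass_mem_snd (rows : List (List Char)) (w : Nat) :
    ∀ (rs : List Nat) (st : PySem.Set Nat × PySem.Set Nat) (y : Nat),
      y ∈ (aPass rows w rs st).2 ↔
        y ∈ st.2 ∧ ¬(∃ r ∈ rs, ∃ c ∈ List.range w, c = y ∧ pvCell rows r c = '#') := by
  intro rs
  induction rs with
  | nil => intro st y; simp [aPass]
  | cons r rs ih =>
    intro st y
    rw [aPass_cons, ih, passInner_mem_snd]
    constructor
    · rintro ⟨⟨h2, h3⟩, h4⟩
      refine ⟨h2, ?_⟩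
      rintro ⟨r', hr', hc⟩
      rcases List.mem_cons.mp hr' with rfl | hr'
      · exact h3 hc
      · exact h4 ⟨r', hr', hc⟩
    · rintro ⟨h2, h3⟩
      refine ⟨⟨h2, fun hc => h3 ⟨r, by simp, hc⟩⟩, ?_⟩
      rintro ⟨r', hr', hc⟩; exact h3 ⟨r', List.mem_cons_of_mem _ hr', hc⟩

-- empty_rows after pass 1: exactly the in-range rows with no galaxy
lemma emptyRows_char (rows : List (List Char)) (w : Nat) (y : Nat) :
    y ∈ (aPass rows w (List.range rows.length)
          (PySem.Set.ofList (List.range rows.length), PySem.Set.ofList (List.range w))).1 ↔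
      y < rows.length ∧ rHasB rows w y = false := by
  rw [aPass_mem_fst]
  constructor
  · rintro ⟨hy, h⟩
    have hy' : y < rows.length := by simpa using (PySem.Set.mem_ofList _ y).mp hy
    refine ⟨hy', ?_⟩
    rw [Bool.eq_false_iff]
    intro htrue
    rcases (by simpa [rHasB, List.any_eq_true] using htrue :
        ∃ c, c < w ∧ pvCell rows y c = '#') with ⟨c, hc, hcell⟩
    exact h ⟨y, by simpa using hy', rfl, c, by simpa using hc, hcell⟩
  · rintro ⟨hy, h⟩
    refine ⟨(PySem.Set.mem_ofList _ y).mpr (by simpa using hy), ?_⟩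
    rintro ⟨r, hr, rfl, c, hc, hcell⟩
    have : rHasB rows w r = true := by
      simp only [rHasB, List.any_eq_true]
      exact ⟨c, hc, by simp [hcell]⟩
    simp [this] at h

-- empty_columns after pass 1: exactly the in-range columns with no galaxy
lemma emptyCols_char (rows : List (List Char)) (w : Nat) (y : Nat) :
    y ∈ (aPass rows w (List.range rows.length)
          (PySem.Set.ofList (List.range rows.length), PySem.Set.ofList (List.range w))).2 ↔
      y < w ∧ cHasB rows y = false := by
  rw [aPass_mem_snd]
  constructor
  · rintro ⟨hy, h⟩
    have hy' : y < w := by simpa using (PySem.Set.mem_ofList _ y).mp hy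
    refine ⟨hy', ?_⟩
    rw [Bool.eq_false_iff]
    intro htrue
    rcases (by simpa [cHasB, List.any_eq_true] using htrue :
        ∃ r, r < rows.length ∧ pvCell rows r y = '#') with ⟨r, hr, hcell⟩
    exact h ⟨r, by simpa using hr, y, by simpa using hy', rfl, hcell⟩
  · rintro ⟨hy, h⟩
    refine ⟨(PySem.Set.mem_ofList _ y).mpr (by simpa using hy), ?_⟩
    rintro ⟨r, hr, c, hc, rfl, hcell⟩
    have : cHasB rows c = true := by
      simp only [cHasB, List.any_eq_true]
      exact ⟨r, by simpa using hr, by simp [hcell]⟩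
    simp [this] at h

-- the prefix-table fold, solved in closed form
lemma bPrefix_fst (bs : List Bool) :
    ∀ (l : List Int) (k : Int),
      (bPrefix bs (l, k)).1
        = l ++ (List.range bs.length).map
            (fun i => k + (((bs.take i).countP (fun b => !b) : Nat) : Int)) := by
  induction bs with
  | nil => intro l k; simp [bPrefix]
  | cons b bs ih =>
    intro l k
    have h1 : bPrefix (b :: bs) (l, k) = bPrefix bs (l ++ [k], if b then k else k + 1) := rfl
    rw [h1, ih, List.length_cons, List.range_succ_eq_map, List.map_cons, List.map_map,
      List.append_assoc, List.singleton_append]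
    simp only [List.take_zero, List.countP_nil, Nat.cast_zero, add_zero]
    congr 2
    apply List.map_congr_left
    intro i _
    simp only [Function.comp_apply, Nat.succ_eq_add_one, List.take_succ_cons, List.countP_cons]
    cases b <;> simp <;> push_cast <;> ring

-- counter step lemmas
lemma cntR_succ_empty (rows : List (List Char)) (w i : Nat) (h : rHasB rows w i = false) :
    cntR rows w (i + 1) = cntR rows w i + 1 := by
  unfold cntR
  rw [List.range_succ, List.countP_append, List.countP_singleton, h]
  simp

lemma cntR_succ_full (rows : List (List Char)) (w i : Nat) (h : rHasB rows w i = true) :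
    cntR rows w (i + 1) = cntR rows w i := by
  unfold cntR
  rw [List.range_succ, List.countP_append, List.countP_singleton, h]
  simp

lemma cntC_succ_empty (rows : List (List Char)) (j : Nat) (h : cHasB rows j = false) :
    cntC rows (j + 1) = cntC rows j + 1 := by
  unfold cntC
  rw [List.range_succ, List.countP_append, List.countP_singleton, h]
  simp

lemma cntC_succ_full (rows : List (List Char)) (j : Nat) (h : cHasB rows j = true) :
    cntC rows (j + 1) = cntC rows j := by
  unfold cntC
  rw [List.range_succ, List.countP_append, List.countP_singleton, h]
  simp

-- B's per-row flag agrees with rHasB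
lemma rowHas_bridge (rows : List (List Char)) (w i : Nat) (hi : i < rows.length) :
    ((rows[i].take w).any (fun ch => ch == '#')) = rHasB rows w i := by
  have hcellrw : ∀ c (hc : c < rows[i].length), pvCell rows i c = (rows[i])[c]'hc := by
    intro c hc
    unfold pvCell
    rw [List.getD_eq_getElem rows [] hi, List.getD_eq_getElem _ ' ' hc]
  rw [Bool.eq_iff_iff]
  simp only [List.any_eq_true, beq_iff_eq, rHasB, List.mem_range]
  constructor
  · rintro ⟨ch, hch, rfl⟩
    rcases List.mem_iff_getElem.mp hch with ⟨c, hc, hget⟩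
    have hlt : c < w ∧ c < rows[i].length := by
      have := hc; rw [List.length_take] at this; omega
    rw [List.getElem_take] at hget
    exact ⟨c, hlt.1, by rw [hcellrw c hlt.2]; exact hget⟩
  · rintro ⟨c, hcw, hcell⟩
    have hclen : c < rows[i].length := by
      by_contra hlen
      rw [show pvCell rows i c = ' ' from by
        unfold pvCell
        rw [List.getD_eq_getElem rows [] hi, List.getD_eq_default _ _ (by omega)]] at hcell
      exact absurd hcell (by decide)
    rw [hcellrw c hclen] at hcell
    refine ⟨rows[i][c], ?_, hcell⟩
    have hc' : c < (rows[i].take w).length := by rw [List.length_take]; omega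
    exact List.mem_iff_getElem.mpr ⟨c, hc', List.getElem_take⟩

-- B's per-column flag agrees with cHasB
lemma colHas_bridge (rows : List (List Char)) (c : Nat) :
    (rows.any (fun row => row.getD c ' ' == '#')) = cHasB rows c := by
  have hcellrw : ∀ r (hr : r < rows.length), pvCell rows r c = (rows[r]'hr).getD c ' ' := by
    intro r hr
    unfold pvCell
    rw [List.getD_eq_getElem rows [] hr]
  rw [Bool.eq_iff_iff]
  simp only [List.any_eq_true, beq_iff_eq, cHasB, List.mem_range]
  constructor
  · rintro ⟨row, hrow, hget⟩
    rcases List.mem_iff_getElem.mp hrow with ⟨r, hr, rfl⟩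
    exact ⟨r, hr, by rw [hcellrw r hr]; exact hget⟩
  · rintro ⟨r, hr, hcell⟩
    exact ⟨rows[r], List.mem_iff_getElem.mpr ⟨r, hr, rfl⟩, by rw [← hcellrw r hr]; exact hcell⟩

-- an empty column contains no galaxy in any in-range row
lemma cell_ne_of_cHasB_false (rows : List (List Char)) {r c : Nat}
    (hr : r < rows.length) (h : cHasB rows c = false) : pvCell rows r c ≠ '#' := by
  intro hcell
  have : cHasB rows c = true := by
    simp only [cHasB, List.any_eq_true]
    exact ⟨r, by simpa using hr, by simp [hcell]⟩
  simp [this] at h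

-- an empty row contains no galaxy in any in-range column
lemma cell_ne_of_rHasB_false (rows : List (List Char)) (w : Nat) {r c : Nat}
    (hc : c < w) (h : rHasB rows w r = false) : pvCell rows r c ≠ '#' := by
  intro hcell
  have : rHasB rows w r = true := by
    simp only [rHasB, List.any_eq_true]
    exact ⟨c, by simpa using hc, by simp [hcell]⟩
  simp [this] at h

-- the inner loop of A's second pass produces B's per-row segment
lemma aMainInner_eq (rows : List (List Char)) (w : Nat) (EC : PySem.Set Nat)
    (off offRow : Int) (r : Nat)
    (hEC : ∀ y, y ∈ EC ↔ y < w ∧ cHasB rows y = false) (hr : r < rows.length) :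
    ∀ (m j : Nat) (g : List (Int × Int)), j + m = w →
      (aMainInner rows r EC off offRow (List.range' j m) (g, off * (cntC rows j : Int))).1
        = g ++ (List.range' j m).filterMap (fun c =>
            if pvCell rows r c = '#'
            then some ((r : Int) + offRow, (c : Int) + off * (cntC rows c : Int)) else none) := by
  intro m
  induction m with
  | zero => intro j g _; simp [aMainInner]
  | succ m ih =>
    intro j g hjm
    rw [List.range'_succ, aMainInner_cons]
    by_cases hj : PySem.Set.contains EC j
    · have hj' := (hEC j).mp ((PySem.Set.contains_iff EC j).mp hj)
      have hne := cell_ne_of_cHasB_false rows hr hj'.2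
      have h2 : off * (cntC rows j : Int) + off = off * (cntC rows (j + 1) : Int) := by
        rw [cntC_succ_empty rows j hj'.2]; push_cast; ring
      rw [if_pos hj, List.filterMap_cons_none (by simp [hne])]
      show (aMainInner rows r EC off offRow (List.range' (j + 1) m)
          (g, off * (cntC rows j : Int) + off)).1 = _
      rw [h2, ih (j + 1) g (by omega)]
    · have hjw : j < w := by omega
      have hcol : cHasB rows j = true := by
        by_contra h
        exact hj ((PySem.Set.contains_iff EC j).mpr ((hEC j).mpr ⟨hjw, by simpa using h⟩))
      have h2 : cntC rows (j + 1) = cntC rows j := cntC_succ_full rows j hcol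
      rw [if_neg hj]
      by_cases hcell : pvCell rows r j = '#'
      · rw [if_pos hcell, List.filterMap_cons_some (b := ((r : Int) + offRow, (j : Int) + off * (cntC rows j : Int))) (by simp [hcell])]
        show (aMainInner rows r EC off offRow (List.range' (j + 1) m)
            (g ++ [((r : Int) + offRow, (j : Int) + off * (cntC rows j : Int))],
             off * (cntC rows j : Int))).1 = _
        rw [← h2, ih (j + 1) _ (by omega), List.append_assoc, List.singleton_append]
      · rw [if_neg hcell, List.filterMap_cons_none (by simp [hcell])]
        show (aMainInner rows r EC off offRow (List.range' (j + 1) m)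
            (g, off * (cntC rows j : Int))).1 = _
        rw [← h2, ih (j + 1) g (by omega)]

-- the outer loop of A's second pass produces the canonical flatMap
lemma aMain_eq (rows : List (List Char)) (w : Nat) (ER EC : PySem.Set Nat) (off : Int)
    (hER : ∀ y, y ∈ ER ↔ y < rows.length ∧ rHasB rows w y = false)
    (hEC : ∀ y, y ∈ EC ↔ y < w ∧ cHasB rows y = false) :
    ∀ (n i : Nat) (g : List (Int × Int)), i + n = rows.length →
      (aMain rows w ER EC off (List.range' i n) (g, off * (cntR rows w i : Int))).1
        = g ++ (List.range' i n).flatMap (fun r =>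
            (List.range w).filterMap (fun c =>
              if pvCell rows r c = '#'
              then some ((r : Int) + off * (cntR rows w r : Int),
                         (c : Int) + off * (cntC rows c : Int)) else none)) := by
  intro n
  induction n with
  | zero => intro i g _; simp [aMain]
  | succ n ih =>
    intro i g hin
    have hi : i < rows.length := by omega
    rw [List.range'_succ, aMain_cons, List.flatMap_cons]
    by_cases hiER : PySem.Set.contains ER i
    · have hi' := (hER i).mp ((PySem.Set.contains_iff ER i).mp hiER)
      have h2 : off * (cntR rows w i : Int) + off = off * (cntR rows w (i + 1) : Int) := by
        rw [cntR_succ_empty rows w i hi'.2]; push_cast; ring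
      have hnil : (List.range w).filterMap (fun c =>
          if pvCell rows i c = '#'
          then some ((i : Int) + off * (cntR rows w i : Int),
                     (c : Int) + off * (cntC rows c : Int)) else none) = [] := by
        rw [List.filterMap_eq_nil_iff]
        intro c hc
        simp [cell_ne_of_rHasB_false rows w (List.mem_range.mp hc) hi'.2]
      rw [if_pos hiER, hnil, List.nil_append]
      show (aMain rows w ER EC off (List.range' (i + 1) n)
          (g, off * (cntR rows w i : Int) + off)).1 = _
      rw [h2, ih (i + 1) g (by omega)]
    · have hrow : rHasB rows w i = true := by
        by_contra h
        exact hiER ((PySem.Set.contains_iff ER i).mpr ((hER i).mpr ⟨hi, by simpa using h⟩))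
      have h2 : cntR rows w (i + 1) = cntR rows w i := cntR_succ_full rows w i hrow
      have hinner := aMainInner_eq rows w EC off (off * ((cntR rows w i : Nat) : Int)) i hEC hi
        w 0 g (by omega)
      rw [show ((cntC rows 0 : Nat) : Int) = (0 : Int) from by simp [cntC], mul_zero,
        ← List.range_eq_range'] at hinner
      rw [if_neg hiER]
      show (aMain rows w ER EC off (List.range' (i + 1) n)
          ((aMainInner rows i EC off (off * (cntR rows w i : Int)) (List.range w) (g, 0)).1,
           off * (cntR rows w i : Int))).1 = _
      rw [hinner]
      have ihi := ih (i + 1) (g ++ (List.range w).filterMap (fun c =>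
          if pvCell rows i c = '#'
          then some ((i : Int) + off * (cntR rows w i : Int),
                     (c : Int) + off * (cntC rows c : Int)) else none)) (by omega)
      rw [h2] at ihi
      rw [ihi, List.append_assoc]

-- counting empty flags over a prefix of the mapped rows = counting over indices
lemma countP_take_map (rows : List (List Char)) (p : List Char → Bool) (q : Nat → Bool)
    (hq : ∀ i (hi : i < rows.length), p (rows[i]'hi) = q i) :
    ∀ r, r ≤ rows.length →
      ((rows.map p).take r).countP (fun b => !b) = (List.range r).countP (fun i => !q i) := by
  intro r
  induction r with
  | zero => intro _; simp
  | succ r ih =>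
    intro hr
    have hrlt : r < rows.length := by omega
    rw [List.take_succ, List.countP_append, ih (by omega), List.range_succ, List.countP_append]
    congr 1
    rw [List.getElem?_eq_getElem (by simpa using hrlt)]
    simp [List.countP_singleton, hq r hrlt]

-- B's rows_before table looks up the row prefix count
lemma rowsBefore_getD (rows : List (List Char)) (w r : Nat) (hr : r < rows.length) :
    ((bPrefix (rows.map (fun row => (row.take w).any (fun ch => ch == '#'))) ([], 0)).1).getD r 0
      = ((cntR rows w r : Nat) : Int) := by
  rw [bPrefix_fst, List.nil_append, List.length_map,
    PySem.List.getD_map_range _ rows.length r 0 hr,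
    countP_take_map rows _ (rHasB rows w) (fun i hi => rowHas_bridge rows w i hi) r (by omega)]
  simp [cntR]

-- B's cols_before table looks up the column prefix count
lemma colsBefore_getD (rows : List (List Char)) (w c : Nat) (hc : c < w) :
    ((bPrefix ((List.range w).map (fun c => rows.any (fun row => row.getD c ' ' == '#')))
        ([], 0)).1).getD c 0 = ((cntC rows c : Nat) : Int) := by
  rw [bPrefix_fst, List.nil_append, List.length_map, List.length_range,
    PySem.List.getD_map_range _ w c 0 hc, ← List.map_take, List.take_range,
    show min c w = c from by omega, List.countP_map]
  have hcg : ((List.range c).countP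
        ((fun b => !b) ∘ (fun c => rows.any (fun row => row.getD c ' ' == '#'))))
      = (List.range c).countP (fun i => !cHasB rows i) := by
    apply List.countP_congr
    intro i _
    simp only [Function.comp_apply, colHas_bridge rows i]
  rw [hcg]
  simp [cntC]

-- both ports compute the canonical flatMap, hence each other
lemma ports_eq (rows : List (List Char)) :
    (aMain rows (rows.headD []).length
        (aPass rows (rows.headD []).length (List.range rows.length)
          (PySem.Set.ofList (List.range rows.length),
           PySem.Set.ofList (List.range (rows.headD []).length))).1
        (aPass rows (rows.headD []).length (List.range rows.length)
          (PySem.Set.ofList (List.range rows.length),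
           PySem.Set.ofList (List.range (rows.headD []).length))).2
        (1000000 - 1) (List.range rows.length) ([], 0)).1
      = (List.range rows.length).flatMap (fun r =>
          (List.range (rows.headD []).length).filterMap (fun c =>
            if pvCell rows r c = '#'
            then some ((r : Int) + (1000000 - 1) *
                  ((bPrefix (rows.map
                      (fun row => (row.take (rows.headD []).length).any (fun ch => ch == '#')))
                    ([], 0)).1).getD r 0,
                 (c : Int) + (1000000 - 1) *
                  ((bPrefix ((List.range (rows.headD []).length).map
                      (fun c => rows.any (fun row => row.getD c ' ' == '#')))
                    ([], 0)).1).getD c 0)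
            else none)) := by
  have hA := aMain_eq rows (rows.headD []).length _ _ (1000000 - 1)
    (emptyRows_char rows (rows.headD []).length) (emptyCols_char rows (rows.headD []).length)
    rows.length 0 [] (by omega)
  rw [show ((cntR rows (rows.headD []).length 0 : Nat) : Int) = 0 from by simp [cntR],
    mul_zero, ← List.range_eq_range'] at hA
  rw [hA, List.nil_append]
  apply List.flatMap_congr
  intro r hr
  apply List.filterMap_congr
  intro c hc
  by_cases hcell : pvCell rows r c = '#'
  · rw [if_pos hcell, if_pos hcell,
      rowsBefore_getD rows (rows.headD []).length r (List.mem_range.mp hr),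
      colsBefore_getD rows (rows.headD []).length c (List.mem_range.mp hc)]
  · rw [if_neg hcell, if_neg hcell]

theorem get_galaxies_positions_spec : Claim_equal_get_galaxies_positions := by
  intro space_map _ _
  show get_galaxies_positions space_map = get_galaxies_positions_alt space_map
  unfold get_galaxies_positions get_galaxies_positions_alt
  exact ports_eq (space_map.map String.toList)
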